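-- pv_equiv track=rewrite | github.com/qlover/local-code | Python/python.class/hone.cipler.py | checkMid
-- ===== SOURCE A (Python) =====
-- def isSings(char):
-- 	sings = ('~','!','@','#','$','%','^','&','*','(',')','_','=','-','/',',','.','?','<','>',';',':','[',']','{','}','|','\\')
-- 	return char in sings;
--
-- def checkMid(ciphers):
-- 	cl = list(str(ciphers))
-- 	flag = False	# 是否是中级密码
--
-- 	if len(cl) <= 8:
-- 		return False
-- 	else:
-- 		# 先用判断是不是字母、数字、符号都有
-- 		has_num = False
-- 		has_lit = False
-- 		for x in cl:
-- 			if x.isdigit():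
-- 				has_num = True	# 发现了数字
-- 			elif x.isalpha():
-- 				has_lit = True	# 发现了字母
-- 			# 都发现了则直接判断为否
-- 			if has_num and has_lit:
-- 				return False
-- 			else: flag = True
--
-- 		# 这里表示没有字母和数字同时存在
-- 		if flag	:
-- 			for x in cl:
-- 				if isSings(x): break; # 一旦发现符号就返回
-- 				# 因为前面已经判断了是否存在字母与数字的其中一个了
-- 	return flag
-- ===== SOURCE B (Python) =====
-- DIGITS = '0123456789'
-- LETTERS = 'abcdefghijklmnopqrstuvwxyzABCDEFGHIJKLMNOPQRSTUVWXYZ'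
--
-- def checkMid(ciphers):
--     s = str(ciphers)
--     if len(s) <= 8:
--         return False
--     present = set(s)
--     return present.isdisjoint(DIGITS) or present.isdisjoint(LETTERS)
-- ===== Notes on version B (the rewrite author's own statement) =====
-- stated objective: faster
-- what changed: Replaced A's interpreted per-character flag loop with early return (plus its dead second symbol loop) by a set-based composition check: build the set of the password's characters once with set(), then decide the result by two set-disjointness tests against the digit and letter alphabets, all running in C-level set operations.
import Mathlib
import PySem

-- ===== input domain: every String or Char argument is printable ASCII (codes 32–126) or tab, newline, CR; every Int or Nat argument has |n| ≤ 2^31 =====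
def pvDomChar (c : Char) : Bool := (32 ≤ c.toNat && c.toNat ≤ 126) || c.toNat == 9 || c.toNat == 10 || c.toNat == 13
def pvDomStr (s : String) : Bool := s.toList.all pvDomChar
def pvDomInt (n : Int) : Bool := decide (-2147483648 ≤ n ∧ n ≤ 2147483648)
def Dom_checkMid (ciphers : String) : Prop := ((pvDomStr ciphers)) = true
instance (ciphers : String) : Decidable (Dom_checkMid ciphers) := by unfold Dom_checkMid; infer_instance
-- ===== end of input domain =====

-- B replaces A's per-character flag loop (plus its dead second symbol loop) by a set-based
-- composition check: build the set of characters once and test disjointness against the digit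
-- and letter alphabets; same return value on the ASCII domain.

-- ===== PORT A =====
def isSings (char : Char) : Bool :=
  ['~','!','@','#','$','%','^','&','*','(',')','_','=','-','/',',','.','?','<','>',';',':','[',']','{','}','|','\\'].contains char

-- A's second loop: scans for a symbol, breaks on the first one, changes nothing; returns flag
def checkMidLoop2 : List Char → Bool → Bool
  | [], flag => flag
  | x :: xs, flag => if isSings x then flag else checkMidLoop2 xs flag

-- A's first loop; cl is the full list (needed for the second loop after the first completes)
def checkMidLoop (cl : List Char) : List Char → Bool → Bool → Bool → Bool
  | [], _, _, flag => if flag then checkMidLoop2 cl flag else flag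
  | x :: xs, has_num, has_lit, _flag =>
    let has_num := if PySem.Chars.isdigit x then true else has_num
    let has_lit := if PySem.Chars.isdigit x then has_lit
                   else if PySem.Chars.isalpha x then true else has_lit
    if has_num && has_lit then false
    else checkMidLoop cl xs has_num has_lit true

def checkMid (ciphers : String) : Bool :=
  let cl := ciphers.toList
  let flag := false
  if cl.length ≤ 8 then false
  else checkMidLoop cl cl false false flag

-- ===== PORT B =====
def pvDigits : List Char := ['0','1','2','3','4','5','6','7','8','9']
def pvLetters : List Char :=
  ['a','b','c','d','e','f','g','h','i','j','k','l','m','n','o','p','q','r','s','t','u','v','w','x','y','z',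
   'A','B','C','D','E','F','G','H','I','J','K','L','M','N','O','P','Q','R','S','T','U','V','W','X','Y','Z']

def checkMid_alt (ciphers : String) : Bool :=
  let s := ciphers.toList
  if s.length ≤ 8 then false
  else
    let present : PySem.Set Char := PySem.Set.ofList s
    PySem.Set.isdisjoint present pvDigits || PySem.Set.isdisjoint present pvLetters

-- ===== PRECONDITION & SPEC =====
def Spec_checkMid (ciphers : String) (out : Bool) : Prop := out = checkMid_alt ciphers
instance (ciphers : String) (out : Bool) : Decidable (Spec_checkMid ciphers out) := by unfold Spec_checkMid; infer_instance

-- ===== CLAIM (what is proved, stated in full; the proofs are below) =====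
def Claim_equal_checkMid : Prop := ∀ (ciphers : String), Dom_checkMid ciphers → Spec_checkMid ciphers (checkMid ciphers)

-- ===== LEMMAS AND PROOFS =====
theorem charToNat_inj (a b : Char) (h : a.toNat = b.toNat) : a = b :=
  Char.ext (UInt32.toNat_inj.mp h)

theorem mem_digits_iff (c : Char) : c ∈ pvDigits ↔ 48 ≤ c.toNat ∧ c.toNat ≤ 57 := by
  have hiff2 : ∀ d : Char, c = d ↔ c.toNat = d.toNat :=
    fun d => ⟨fun e => e ▸ rfl, charToNat_inj c d⟩
  simp only [pvDigits, List.mem_cons, List.not_mem_nil, or_false, hiff2, show '0'.toNat = 48 from rfl, show '1'.toNat = 49 from rfl, show '2'.toNat = 50 from rfl, show '3'.toNat = 51 from rfl, show '4'.toNat = 52 from rfl, show '5'.toNat = 53 from rfl, show '6'.toNat = 54 from rfl, show '7'.toNat = 55 from rfl, show '8'.toNat = 56 from rfl, show '9'.toNat = 57 from rfl]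
  omega

theorem mem_letters_iff (c : Char) :
    c ∈ pvLetters ↔ (65 ≤ c.toNat ∧ c.toNat ≤ 90) ∨ (97 ≤ c.toNat ∧ c.toNat ≤ 122) := by
  have hiff2 : ∀ d : Char, c = d ↔ c.toNat = d.toNat :=
    fun d => ⟨fun e => e ▸ rfl, charToNat_inj c d⟩
  simp only [pvLetters, List.mem_cons, List.not_mem_nil, or_false, hiff2, show 'a'.toNat = 97 from rfl, show 'b'.toNat = 98 from rfl, show 'c'.toNat = 99 from rfl, show 'd'.toNat = 100 from rfl, show 'e'.toNat = 101 from rfl, show 'f'.toNat = 102 from rfl, show 'g'.toNat = 103 from rfl, show 'h'.toNat = 104 from rfl, show 'i'.toNat = 105 from rfl, show 'j'.toNat = 106 from rfl, show 'k'.toNat = 107 from rfl, show 'l'.toNat = 108 from rfl, show 'm'.toNat = 109 from rfl, show 'n'.toNat = 110 from rfl, show 'o'.toNat = 111 from rfl, show 'p'.toNat = 112 from rfl, show 'q'.toNat = 113 from rfl, show 'r'.toNat = 114 from rfl, show 's'.toNat = 115 from rfl, show 't'.toNat = 116 from rfl, show 'u'.toNat = 117 from rfl, show 'v'.toNat = 118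 from rfl, show 'w'.toNat = 119 from rfl, show 'x'.toNat = 120 from rfl, show 'y'.toNat = 121 from rfl, show 'z'.toNat = 122 from rfl, show 'A'.toNat = 65 from rfl, show 'B'.toNat = 66 from rfl, show 'C'.toNat = 67 from rfl, show 'D'.toNat = 68 from rfl, show 'E'.toNat = 69 from rfl, show 'F'.toNat = 70 from rfl, show 'G'.toNat = 71 from rfl, show 'H'.toNat = 72 from rfl, show 'I'.toNat = 73 from rfl, show 'J'.toNat = 74 from rfl, show 'K'.toNat = 75 from rfl, show 'L'.toNat = 76 from rfl, show 'M'.toNat = 77 from rfl, show 'N'.toNat = 78 from rfl, show 'O'.toNat = 79 from rfl, show 'P'.toNat = 80 from rfl, show 'Q'.toNat = 81 from rfl, show 'R'.toNat = 82 from rfl, show 'S'.toNat = 83 from rfl, show 'T'.toNat = 84 from rfl, show 'U'.toNat = 85 from rfl, show 'V'.toNat = 86 from rfl, show 'W'.toNat = 87 from rfl, show 'X'.toNat = 88 from rfl, show 'Y'.toNat = 89 from rfl, show 'Z'.toNat = 90 from rfl]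
  omega

theorem isdigit_iff (c : Char) : PySem.Chars.isdigit c = true ↔ 48 ≤ c.toNat ∧ c.toNat ≤ 57 := by
  simp only [PySem.Chars.isdigit, Bool.and_eq_true, decide_eq_true_eq, Char.le_def,
    UInt32.le_iff_toNat_le, Char.toNat_val, show '0'.toNat = 48 from rfl, show '9'.toNat = 57 from rfl]

theorem isalpha_iff (c : Char) :
    PySem.Chars.isalpha c = true ↔ (65 ≤ c.toNat ∧ c.toNat ≤ 90) ∨ (97 ≤ c.toNat ∧ c.toNat ≤ 122) := by
  simp only [PySem.Chars.isalpha, PySem.Chars.isupper, PySem.Chars.islower, Bool.or_eq_true,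
    Bool.and_eq_true, decide_eq_true_eq, Char.le_def, UInt32.le_iff_toNat_le, Char.toNat_val, show 'A'.toNat = 65 from rfl, show 'Z'.toNat = 90 from rfl, show 'a'.toNat = 97 from rfl, show 'z'.toNat = 122 from rfl]

theorem digits_contains_eq (c : Char) : PySem.Set.contains pvDigits c = PySem.Chars.isdigit c := by
  rw [PySem.Set.contains_eq_listContains, List.contains_eq_mem]
  cases h : PySem.Chars.isdigit c
  · simp only [decide_eq_false_iff_not, mem_digits_iff]
    rw [Bool.eq_false_iff] at h
    intro hb; exact h ((isdigit_iff c).mpr hb)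
  · simp only [decide_eq_true_eq, mem_digits_iff]
    exact (isdigit_iff c).mp h

theorem letters_contains_eq (c : Char) : PySem.Set.contains pvLetters c = PySem.Chars.isalpha c := by
  rw [PySem.Set.contains_eq_listContains, List.contains_eq_mem]
  cases h : PySem.Chars.isalpha c
  · simp only [decide_eq_false_iff_not, mem_letters_iff]
    rw [Bool.eq_false_iff] at h
    intro hb; exact h ((isalpha_iff c).mpr hb)
  · simp only [decide_eq_true_eq, mem_letters_iff]
    exact (isalpha_iff c).mp h

theorem isdisjoint_ofList_eq (l alpha : List Char) (p : Char → Bool)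
    (hp : ∀ c : Char, PySem.Set.contains alpha c = p c) :
    PySem.Set.isdisjoint (PySem.Set.ofList l) alpha = !(l.any p) := by
  unfold PySem.Set.isdisjoint
  congr 1
  cases h1 : l.any p
  · rw [List.any_eq_false] at h1 ⊢
    intro x hx
    rw [PySem.Set.mem_ofList _ _] at hx
    rw [hp x]
    exact h1 x hx
  · rw [List.any_eq_true] at h1 ⊢
    obtain ⟨x, hx, hd⟩ := h1
    exact ⟨x, (PySem.Set.mem_ofList _ _).mpr hx, by rw [hp x]; exact hd⟩

theorem digit_not_alpha (c : Char) (h : PySem.Chars.isdigit c = true) :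
    PySem.Chars.isalpha c = false := by
  rw [isdigit_iff] at h
  rw [Bool.eq_false_iff, Ne, isalpha_iff]
  omega

theorem checkMidLoop2_eq (l : List Char) (flag : Bool) : checkMidLoop2 l flag = flag := by
  induction l with
  | nil => rfl
  | cons x xs ih => simp [checkMidLoop2, ih]

theorem checkMidLoop_eq (l : List Char) : ∀ (cl : List Char) (hn hl : Bool),
    (hn && hl) = false →
    checkMidLoop cl l hn hl true =
      !((hn || l.any PySem.Chars.isdigit) && (hl || l.any PySem.Chars.isalpha)) := by
  induction l with
  | nil =>
    intro cl hn hl h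
    simp [checkMidLoop, checkMidLoop2_eq, h]
  | cons x xs ih =>
    intro cl hn hl h
    cases hd : PySem.Chars.isdigit x with
    | true =>
      have hal : PySem.Chars.isalpha x = false := digit_not_alpha x hd
      cases hl with
      | true => simp [checkMidLoop, hd, hal]
      | false => simp [checkMidLoop, hd, hal, ih cl true false rfl]
    | false =>
      cases hal : PySem.Chars.isalpha x with
      | false => simp [checkMidLoop, hd, hal, ih cl hn hl h, h]
      | true =>
        cases hn with
        | true =>
          have hl0 : hl = false := by simpa using h
          subst hl0
          simp [checkMidLoop, hd, hal]
        | false => simp [checkMidLoop, hd, hal, ih cl false true rfl]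

-- ===== VERDICT (by name: the statement is the Claim_ definition above) =====
theorem checkMid_spec : Claim_equal_checkMid := by
  intro ciphers _
  unfold Spec_checkMid checkMid checkMid_alt
  dsimp only
  split_ifs with hlen
  · rfl
  · rw [isdisjoint_ofList_eq _ _ _ digits_contains_eq,
        isdisjoint_ofList_eq _ _ _ letters_contains_eq]
    cases hcl : ciphers.toList with
    | nil => simp [hcl] at hlen
    | cons x xs =>
      show checkMidLoop (x :: xs) (x :: xs) false false true
          = (!((x :: xs).any PySem.Chars.isdigit) || !((x :: xs).any PySem.Chars.isalpha))
      rw [checkMidLoop_eq (x :: xs) (x :: xs) false false rfl]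
      simp
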